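-- pv_equiv track=rewrite | github.com/KaiOWhatmore/project-euler | p37.py | l_r_is_prime
-- ===== SOURCE A (Python) =====
-- def l_r_is_prime(num, primes):
--     divisor = 10
--     truncated_num = num // divisor
--     while truncated_num:
--         if truncated_num not in primes:
--             return False
--         divisor *= 10
--         truncated_num = num // divisor
--     return True
-- ===== SOURCE B (Python) =====
-- def l_r_is_prime(num, primes):
--     s = str(num)
--     reps = [str(p) for p in primes]
--     return all(s[:i] in reps for i in range(1, len(s)))
-- ===== Notes on version B (the rewrite author's own statement) =====
-- stated objective: alternative
-- what changed: B works on decimal strings instead of arithmetic: it renders num and every prime to a string once and checks each proper prefix of str(num) for membership among the rendered primes, replacing A's while loop of floor divisions by a growing power-of-ten divisor.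
-- outside the precondition, e.g. on l_r_is_prime(-37, {-1}): A returns False, B returns False
import Mathlib
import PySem

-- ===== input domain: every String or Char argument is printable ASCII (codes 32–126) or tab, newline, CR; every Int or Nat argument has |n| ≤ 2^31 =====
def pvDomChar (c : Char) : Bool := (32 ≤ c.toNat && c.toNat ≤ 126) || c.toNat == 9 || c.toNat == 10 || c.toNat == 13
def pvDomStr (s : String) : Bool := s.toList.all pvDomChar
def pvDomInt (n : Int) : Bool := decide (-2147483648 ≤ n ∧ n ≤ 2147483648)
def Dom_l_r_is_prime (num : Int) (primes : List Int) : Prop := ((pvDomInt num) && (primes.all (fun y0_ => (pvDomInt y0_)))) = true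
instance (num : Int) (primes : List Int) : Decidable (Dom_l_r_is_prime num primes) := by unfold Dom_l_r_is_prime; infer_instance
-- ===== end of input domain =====

-- B renders num and the primes to decimal strings and checks every proper prefix of str(num) for membership among them, instead of A's floor-division loop; equal cost, different representation.


-- ===== PORT A =====
-- A's while loop: fuel only makes the recursion total; 64 iterations are more than
-- enough for every |num| ≤ 2^31 admitted by Dom (the loop runs ≤ 11 times there).
def pvALoop (num : Int) (primes : List Int) (divisor : Int) : Nat → Bool
  | 0 => true
  | fuel + 1 =>
    let truncated := PySem.Int.floordiv num divisor
    if truncated ≠ 0 then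
      if !primes.contains truncated then false
      else pvALoop num primes (divisor * 10) fuel
    else true

def l_r_is_prime (num : Int) (primes : List Int) : Bool :=
  pvALoop num primes 10 64

-- ===== PORT B =====
-- Source B: s = str(num); reps = [str(p) for p in primes];
--       all(s[:i] in reps for i in range(1, len(s)))
def l_r_is_prime_alt (num : Int) (primes : List Int) : Bool :=
  let s := PySem.Int.toStr num
  let reps := primes.map PySem.Int.toStr
  (PySem.List.pyRange 1 (PySem.Str.len s) 1).all fun i =>
    reps.contains (PySem.Str.slice s none (some i))

-- ===== PRECONDITION & SPEC =====
-- Pre_ excludes only negative num with -1 in primes: a negative num floor-divides to the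
-- fixpoint -1 and never to 0, so A loops forever as soon as every truncation (…, -4, -1)
-- lies in primes; where A does return on such inputs it returns False, as B does.
def Pre_l_r_is_prime (num : Int) (primes : List Int) : Prop := 0 ≤ num ∨ (-1 : Int) ∉ primes
instance (num : Int) (primes : List Int) : Decidable (Pre_l_r_is_prime num primes) := by unfold Pre_l_r_is_prime; infer_instance
def pvWitness_l_r_is_prime : Int × List Int := (797, [2, 7, 79, 797])

def Spec_l_r_is_prime (num : Int) (primes : List Int) (out : Bool) : Prop := out = l_r_is_prime_alt num primes
instance (num : Int) (primes : List Int) (out : Bool) : Decidable (Spec_l_r_is_prime num primes out) := by unfold Spec_l_r_is_prime; infer_instance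

-- ===== CLAIM (what is proved, stated in full; the proofs are below) =====
def Claim_equal_l_r_is_prime : Prop := ∀ (num : Int) (primes : List Int), Dom_l_r_is_prime num primes → Pre_l_r_is_prime num primes → Spec_l_r_is_prime num primes (l_r_is_prime num primes)

-- ===== LEMMAS AND PROOFS =====

-- num // 10^j == 0 exactly when num < 10^j (for 0 ≤ num)
theorem trunc_zero_iff (num : Int) (j : Nat) (hnum : 0 ≤ num) :
    PySem.Int.floordiv num ((10:Int) ^ j) = 0 ↔ num < 10 ^ j := by
  have hpos : (0:Int) < 10 ^ j := by positivity
  rw [PySem.Int.floordiv_eq_ediv_of_pos hpos]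
  constructor
  · intro h
    by_contra hlt
    push Not at hlt
    have : (1:Int) ≤ num / 10 ^ j := by
      rw [Int.le_ediv_iff_mul_le hpos]; omega
    omega
  · intro h; exact Int.ediv_eq_zero_of_lt hnum h

-- A's loop, at divisor 10^j with enough fuel, is true iff every truncation
-- num // 10^k with j ≤ k and 10^k ≤ num is in primes.
theorem pvALoop_iff (num : Int) (primes : List Int) (hnum : 0 ≤ num) :
    ∀ (fuel j : Nat), num < 10 ^ (j + fuel) →
      (pvALoop num primes (10 ^ j) fuel = true ↔
        ∀ k : Nat, j ≤ k → (10 : Int) ^ k ≤ num →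
          primes.contains (PySem.Int.floordiv num (10 ^ k)) = true) := by
  intro fuel
  induction fuel with
  | zero =>
    intro j hlt
    rw [Nat.add_zero] at hlt
    simp only [pvALoop, true_iff]
    intro k hk hkle
    have : (10:Int) ^ j ≤ 10 ^ k := pow_le_pow_right₀ (by norm_num) hk
    omega
  | succ f ih =>
    intro j hlt
    by_cases h0 : PySem.Int.floordiv num ((10:Int) ^ j) = 0
    · have hjlt : num < 10 ^ j := (trunc_zero_iff num j hnum).mp h0
      simp only [pvALoop, h0, ne_eq, not_true_eq_false, if_false, true_iff]
      intro k hk hkle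
      have : (10:Int) ^ j ≤ 10 ^ k := pow_le_pow_right₀ (by norm_num) hk
      omega
    · have hjle : (10:Int) ^ j ≤ num := by
        by_contra hlt'
        push Not at hlt'
        exact h0 ((trunc_zero_iff num j hnum).mpr hlt')
      by_cases hc : primes.contains (PySem.Int.floordiv num (10 ^ j)) = true
      · simp only [pvALoop, h0, ne_eq, not_false_eq_true, if_true, hc, Bool.not_true,
          Bool.false_eq_true, if_false]
        have hrec : (10:Int) ^ j * 10 = 10 ^ (j+1) := by rw [pow_succ]
        rw [hrec, ih (j+1) (by
          have : j + 1 + f = j + (f+1) := by omega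
          rwa [this])]
        constructor
        · intro h k h1 h2
          by_cases hk : k = j
          · exact hk ▸ hc
          · exact h k (by omega) h2
        · intro h k h1 h2; exact h k (by omega) h2
      · simp only [Bool.not_eq_true] at hc
        simp only [pvALoop, h0, ne_eq, not_false_eq_true, if_true, hc, Bool.not_false,
          Bool.false_eq_true, if_true, false_iff]
        intro h
        have := h j (le_refl _) hjle
        rw [hc] at this; cases this

-- the decimal character string of a natural number, most significant digit first
def natChars (n : Nat) : List Char :=
  if n < 10 then [Nat.digitChar n]
  else natChars (n / 10) ++ [Nat.digitChar (n % 10)]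
  termination_by n
  decreasing_by exact Nat.div_lt_self (by omega) (by omega)

theorem toDigitsCore_eq_natChars (f : Nat) : ∀ (n : Nat) (ds : List Char), n < f →
    Nat.toDigitsCore 10 f n ds = natChars n ++ ds := by
  induction f with
  | zero => intro n ds h; omega
  | succ f ih =>
    intro n ds h
    rw [Nat.toDigitsCore]
    by_cases h0 : n / 10 = 0
    · have hn : n < 10 := by omega
      rw [natChars]
      simp [h0, hn, Nat.mod_eq_of_lt hn]
    · have hn : ¬ n < 10 := by omega
      rw [natChars]
      simp only [hn, if_false, h0, if_false]
      rw [ih (n / 10) _ (by omega), List.append_assoc]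
      rfl

theorem toChars_natCast (n : Nat) : PySem.Int.toChars (↑n) = natChars n := by
  unfold PySem.Int.toChars
  rw [if_neg (by omega)]
  show Nat.toDigits 10 (Int.toNat ↑n) = natChars n
  rw [Int.toNat_natCast, Nat.toDigits,
    toDigitsCore_eq_natChars (n + 1) n [] (by omega), List.append_nil]

theorem digitChar_toNat (d : Nat) (h : d < 10) : (Nat.digitChar d).toNat = 48 + d := by
  interval_cases d <;> decide

-- the decimal value of a digit string
def chVal (cs : List Char) : Nat := cs.foldl (fun a c => 10 * a + (c.toNat - 48)) 0

theorem chVal_natChars (n : Nat) : chVal (natChars n) = n := by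
  induction n using Nat.strong_induction_on with
  | _ n ih =>
    rw [natChars]
    by_cases h : n < 10
    · simp only [h, if_true, chVal, List.foldl]
      rw [digitChar_toNat n h]; omega
    · simp only [h, if_false]
      have hd : n / 10 < n := Nat.div_lt_self (by omega) (by omega)
      have hv := ih (n / 10) hd
      unfold chVal
      rw [List.foldl_append]
      show 10 * chVal (natChars (n / 10)) + ((Nat.digitChar (n % 10)).toNat - 48) = n
      rw [hv, digitChar_toNat (n % 10) (Nat.mod_lt n (by omega))]
      omega

theorem natChars_inj {a b : Nat} (h : natChars a = natChars b) : a = b := by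
  have := congrArg chVal h
  rwa [chVal_natChars, chVal_natChars] at this

theorem natChars_mem_ge (n : Nat) : ∀ c ∈ natChars n, 48 ≤ c.toNat := by
  induction n using Nat.strong_induction_on with
  | _ n ih =>
    intro c hc
    rw [natChars] at hc
    by_cases h : n < 10
    · simp only [h, if_true, List.mem_singleton] at hc
      rw [hc, digitChar_toNat n h]; omega
    · simp only [h, if_false, List.mem_append, List.mem_singleton] at hc
      rcases hc with hc | hc
      · exact ih (n / 10) (Nat.div_lt_self (by omega) (by omega)) c hc
      · rw [hc, digitChar_toNat (n % 10) (Nat.mod_lt n (by omega))]; omega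

theorem natChars_ne_nil (n : Nat) : natChars n ≠ [] := by
  rw [natChars]
  by_cases h : n < 10 <;> simp [h]

theorem lt_pow_length (n : Nat) : n < 10 ^ (natChars n).length := by
  induction n using Nat.strong_induction_on with
  | _ n ih =>
    rw [natChars]
    by_cases h : n < 10
    · simp [h]
    · simp only [h, if_false, List.length_append, List.length_singleton]
      have hd : n / 10 < n := Nat.div_lt_self (by omega) (by omega)
      have := ih (n / 10) hd
      have hm : n % 10 < 10 := Nat.mod_lt n (by omega)
      have hdm : n = 10 * (n / 10) + n % 10 := (Nat.div_add_mod n 10).symm ▸ by omega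
      rw [pow_succ]
      set P := 10 ^ (natChars (n / 10)).length
      omega

theorem pow_pred_le (n : Nat) (h1 : 1 ≤ n) : 10 ^ ((natChars n).length - 1) ≤ n := by
  induction n using Nat.strong_induction_on with
  | _ n ih =>
    rw [natChars]
    by_cases h : n < 10
    · simp only [h, if_true, List.length_singleton, Nat.sub_self, pow_zero]; omega
    · simp only [h, if_false, List.length_append, List.length_singleton]
      have hd : n / 10 < n := Nat.div_lt_self (by omega) (by omega)
      have h10 : 1 ≤ n / 10 := by omega
      have := ih (n / 10) hd h10
      have hlen : 1 ≤ (natChars (n / 10)).length :=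
        List.length_pos_of_ne_nil (natChars_ne_nil _)
      have heq : (natChars (n / 10)).length + 1 - 1 = ((natChars (n / 10)).length - 1) + 1 := by
        omega
      rw [heq, pow_succ]
      have hge : 10 * (n / 10) ≤ n := by omega
      calc 10 ^ ((natChars (n / 10)).length - 1) * 10 ≤ (n / 10) * 10 := by
            exact Nat.mul_le_mul_right 10 this
        _ ≤ n := by omega

theorem natChars_div_append (k : Nat) : ∀ n : Nat, 10 ^ k ≤ n →
    ∃ sfx : List Char, natChars n = natChars (n / 10 ^ k) ++ sfx ∧ sfx.length = k := by
  induction k with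
  | zero => intro n _; exact ⟨[], by simp, rfl⟩
  | succ k ih =>
    intro n h
    have h10k : (10:Nat) ≤ 10 ^ (k + 1) := by
      calc (10:Nat) = 10 ^ 1 := by norm_num
        _ ≤ 10 ^ (k+1) := Nat.pow_le_pow_right (by omega) (by omega)
    have hn : ¬ n < 10 := by omega
    have hdiv : 10 ^ k ≤ n / 10 := by
      rw [Nat.le_div_iff_mul_le (by omega)]
      calc 10 ^ k * 10 = 10 ^ (k+1) := (pow_succ 10 k)
        _ ≤ n := h
    obtain ⟨s, hs, hl⟩ := ih (n / 10) hdiv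
    refine ⟨s ++ [Nat.digitChar (n % 10)], ?_, by simp [hl]⟩
    conv_lhs => rw [natChars]
    simp only [hn, if_false, hs]
    have hdd : n / 10 / 10 ^ k = n / 10 ^ (k + 1) := by
      rw [Nat.div_div_eq_div_mul, ← pow_succ']
    rw [hdd, List.append_assoc]

theorem take_natChars (n k : Nat) (h : 10 ^ k ≤ n) :
    (natChars n).take ((natChars n).length - k) = natChars (n / 10 ^ k) := by
  obtain ⟨sfx, he, hl⟩ := natChars_div_append k n h
  rw [he, List.length_append, hl, Nat.add_sub_cancel, List.take_left]

theorem toChars_eq_natChars_iff (p : Int) (m : Nat) :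
    PySem.Int.toChars p = natChars m ↔ p = ↑m := by
  constructor
  · intro h
    unfold PySem.Int.toChars at h
    by_cases hp : p < 0
    · rw [if_pos hp] at h
      have hmem : '-' ∈ natChars m := h ▸ List.mem_cons_self
      have := natChars_mem_ge m '-' hmem
      simp [Char.toNat] at this
    · rw [if_neg hp] at h
      have h2 : natChars p.toNat = natChars m := by
        rw [← h, Nat.toDigits,
          toDigitsCore_eq_natChars (p.toNat + 1) p.toNat [] (by omega), List.append_nil]
      have := natChars_inj h2
      omega
  · rintro rfl
    exact toChars_natCast m

theorem floordiv_natCast_pow (n k : Nat) :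
    PySem.Int.floordiv (↑n) ((10:Int) ^ k) = ↑(n / 10 ^ k) := by
  rw [PySem.Int.floordiv_eq_ediv_of_pos (by positivity)]
  push_cast
  rfl

-- one B step: membership of the prefix s[:i] among the rendered primes is exactly
-- membership of the corresponding truncation among the primes
theorem prefix_mem_iff (primes : List Int) (n : Nat) (h1 : 1 ≤ n) (i : Int)
    (hi1 : 1 ≤ i) (hiL : i < ((natChars n).length : Int)) :
    ((primes.map PySem.Int.toStr).contains
        (PySem.Str.slice (PySem.Int.toStr ↑n) none (some i)) = true ↔
      primes.contains ((↑(n / 10 ^ ((natChars n).length - i.toNat)) : Int)) = true) := by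
  set L := (natChars n).length with hL
  set k := L - i.toNat with hk
  have hkn : 10 ^ k ≤ n := by
    have h1k : k ≤ L - 1 := by omega
    calc 10 ^ k ≤ 10 ^ (L - 1) := Nat.pow_le_pow_right (by omega) h1k
      _ ≤ n := pow_pred_le n h1
  have hslice : (PySem.Str.slice (PySem.Int.toStr ↑n) none (some i)).toList
      = natChars (n / 10 ^ k) := by
    rw [PySem.Str.toList_slice, PySem.Chars.slice_eq_listSlice, PySem.Int.toList_toStr,
      toChars_natCast, PySem.List.slice_to _ (by omega)]
    have : i.toNat = L - k := by omega
    rw [this, ← take_natChars n k hkn]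
  simp only [List.contains_eq_mem, decide_eq_true_eq, List.mem_map]
  constructor
  · rintro ⟨p, hp, hps⟩
    have : PySem.Int.toChars p = natChars (n / 10 ^ k) := by
      rw [← PySem.Int.toList_toStr, hps, hslice]
    rw [(toChars_eq_natChars_iff p _).mp this] at hp
    exact hp
  · intro hp
    refine ⟨↑(n / 10 ^ k), hp, ?_⟩
    apply String.toList_inj.mp
    rw [PySem.Int.toList_toStr, hslice, toChars_natCast]

-- B is true iff every truncation num // 10^k (1 ≤ k, 10^k ≤ num) is in primes
theorem alt_iff (primes : List Int) (n : Nat) (h1 : 1 ≤ n) :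
    (l_r_is_prime_alt (↑n) primes = true ↔
      ∀ k : Nat, 1 ≤ k → (10:Int) ^ k ≤ ↑n →
        primes.contains (PySem.Int.floordiv (↑n) (10 ^ k)) = true) := by
  set L := (natChars n).length with hL
  have hLpos : 1 ≤ L := List.length_pos_of_ne_nil (natChars_ne_nil n)
  have hlen : PySem.Str.len (PySem.Int.toStr ↑n) = (L : Int) := by
    rw [PySem.Str.len_eq, PySem.Int.toList_toStr, toChars_natCast]
  have hpowle : ∀ k : Nat, 1 ≤ k → ((10:Int) ^ k ≤ ↑n ↔ k ≤ L - 1) := by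
    intro k _
    have h3 : n < (10:Nat) ^ L := by rw [hL]; exact lt_pow_length n
    constructor
    · intro h
      have hN : (10:Nat) ^ k ≤ n := by exact_mod_cast h
      by_contra hgt
      have h2 : (10:Nat) ^ L ≤ 10 ^ k := Nat.pow_le_pow_right (by omega) (by omega)
      omega
    · intro h
      have hN : (10:Nat) ^ k ≤ n :=
        le_trans (Nat.pow_le_pow_right (by omega) h) (pow_pred_le n h1)
      exact_mod_cast hN
  unfold l_r_is_prime_alt
  simp only [hlen, List.all_eq_true]
  constructor
  · intro h k hk1 hkle
    have hkL : k ≤ L - 1 := (hpowle k hk1).mp hkle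
    have hi : ((L - k : Nat) : Int) ∈ PySem.List.pyRange 1 (L : Int) 1 := by
      rw [PySem.List.mem_pyRange_one]
      omega
    have := h _ hi
    rw [prefix_mem_iff primes n h1 _ (by omega) (by omega)] at this
    have hfix : L - ((L - k : Nat) : Int).toNat = k := by omega
    rw [hfix] at this
    rw [floordiv_natCast_pow]
    exact this
  · intro h i hi
    rw [PySem.List.mem_pyRange_one] at hi
    rw [prefix_mem_iff primes n h1 i hi.1 hi.2]
    have hk1 : 1 ≤ L - i.toNat := by omega
    have := h (L - i.toNat) hk1 ((hpowle _ hk1).mpr (by omega))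
    rwa [floordiv_natCast_pow] at this

theorem toChars_neg (p : Int) (hp : p < 0) :
    PySem.Int.toChars p = '-' :: natChars p.natAbs := by
  unfold PySem.Int.toChars
  rw [if_pos hp]
  congr 1
  rw [Nat.toDigits, toDigitsCore_eq_natChars (p.natAbs + 1) p.natAbs [] (by omega),
    List.append_nil]

-- B on a negative num: the first prefix '-' matches no rendered integer, so B is False
theorem alt_neg_false (num : Int) (primes : List Int) (hneg : num < 0) :
    l_r_is_prime_alt num primes = false := by
  have htc := toChars_neg num hneg
  have hlen : PySem.Str.len (PySem.Int.toStr num)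
      = (((natChars num.natAbs).length : Int) + 1) := by
    rw [PySem.Str.len_eq, PySem.Int.toList_toStr, htc, List.length_cons]
    push_cast
    ring
  have hpos : 1 ≤ (natChars num.natAbs).length :=
    List.length_pos_of_ne_nil (natChars_ne_nil num.natAbs)
  unfold l_r_is_prime_alt
  simp only [hlen]
  rw [Bool.eq_false_iff]
  intro hall
  rw [List.all_eq_true] at hall
  have h1mem : (1:Int) ∈ PySem.List.pyRange 1 (((natChars num.natAbs).length : Int) + 1) 1 := by
    rw [PySem.List.mem_pyRange_one]
    omega
  have hone := hall _ h1mem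
  have hslice : (PySem.Str.slice (PySem.Int.toStr num) none (some 1)).toList = ['-'] := by
    rw [PySem.Str.toList_slice, PySem.Chars.slice_eq_listSlice, PySem.Int.toList_toStr,
      htc, PySem.List.slice_to _ (by omega)]
    rfl
  simp only [List.contains_eq_mem, decide_eq_true_eq, List.mem_map] at hone
  obtain ⟨p, _, hps⟩ := hone
  have hpl : PySem.Int.toChars p = ['-'] := by
    rw [← PySem.Int.toList_toStr, hps, hslice]
  by_cases hp : p < 0
  · rw [toChars_neg p hp] at hpl
    injection hpl with _ h2
    exact natChars_ne_nil p.natAbs h2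
  · have hpc : PySem.Int.toChars p = natChars p.toNat := by
      obtain ⟨q, rfl⟩ := Int.eq_ofNat_of_zero_le (by omega : (0:Int) ≤ p)
      rw [toChars_natCast]
      simp
    rw [hpc] at hpl
    have hmem : '-' ∈ natChars p.toNat := by rw [hpl]; exact List.mem_singleton.mpr rfl
    have := natChars_mem_ge p.toNat '-' hmem
    simp [Char.toNat] at this

-- A on a negative num: the truncation is never 0, so the loop runs until it meets a
-- truncation that is not in primes and returns False
theorem pvALoop_neg_false (num : Int) (primes : List Int) (hneg : num < 0) :
    ∀ (fuel j : Nat),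
      (∃ m : Nat, j ≤ m ∧ m < j + fuel ∧
        primes.contains (PySem.Int.floordiv num (10 ^ m)) = false) →
      pvALoop num primes (10 ^ j) fuel = false := by
  intro fuel
  induction fuel with
  | zero =>
    intro j ⟨m, h1, h2, _⟩
    omega
  | succ f ih =>
    intro j ⟨m, hm1, hm2, hm3⟩
    have htneg : PySem.Int.floordiv num ((10:Int) ^ j) < 0 := by
      rw [PySem.Int.floordiv_lt_iff_lt_mul (by positivity)]
      simpa using hneg
    by_cases hc : primes.contains (PySem.Int.floordiv num (10 ^ j)) = true
    · have hmj : m ≠ j := by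
        intro h
        rw [← h] at hc
        rw [hm3] at hc
        cases hc
      simp only [pvALoop, ne_eq, if_pos (by omega : ¬ PySem.Int.floordiv num ((10:Int) ^ j) = 0),
        hc, Bool.not_true, Bool.false_eq_true, if_false]
      have hrec : (10:Int) ^ j * 10 = 10 ^ (j+1) := by rw [pow_succ]
      rw [hrec]
      exact ih (j+1) ⟨m, by omega, by omega, hm3⟩
    · simp only [Bool.not_eq_true] at hc
      simp only [pvALoop, ne_eq, if_pos (by omega : ¬ PySem.Int.floordiv num ((10:Int) ^ j) = 0),
        hc, Bool.not_false, if_true]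

-- ===== VERDICT (by name: the statement is the Claim_ definition above) =====
theorem l_r_is_prime_spec : Claim_equal_l_r_is_prime := by
  intro num primes hdom hpre
  unfold Spec_l_r_is_prime
  by_cases hnum : (0:Int) ≤ num
  case neg =>
    have hneg : num < 0 := by omega
    have hm1 : (-1 : Int) ∉ primes := hpre.resolve_left hnum
    have hub : -2147483648 ≤ num := by
      unfold Dom_l_r_is_prime pvDomInt at hdom
      simp only [Bool.and_eq_true, decide_eq_true_eq] at hdom
      exact hdom.1.1
    have hm33 : PySem.Int.floordiv num ((10:Int) ^ 33) = -1 := by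
      rw [PySem.Int.floordiv_eq_iff_of_pos (by positivity)]
      norm_num
      omega
    have hA : l_r_is_prime num primes = false := by
      unfold l_r_is_prime
      have h10 : (10:Int) = 10 ^ 1 := by norm_num
      rw [h10]
      apply pvALoop_neg_false num primes hneg 64 1
      refine ⟨33, by omega, by omega, ?_⟩
      rw [hm33]
      simp only [List.contains_eq_mem, decide_eq_false_iff_not]
      exact hm1
    rw [hA, alt_neg_false num primes hneg]
  case pos =>
  obtain ⟨n, rfl⟩ := Int.eq_ofNat_of_zero_le hnum
  by_cases h1 : 1 ≤ n
  · have hub : (↑n : Int) < 10 ^ 10 := by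
      unfold Dom_l_r_is_prime pvDomInt at hdom
      simp only [Bool.and_eq_true, decide_eq_true_eq] at hdom
      have := hdom.1.2
      norm_num
      omega
    have hA := pvALoop_iff (↑n) primes hnum 64 1 (by
      calc (↑n : Int) < 10 ^ 10 := hub
        _ ≤ 10 ^ (1 + 64) := pow_le_pow_right₀ (by norm_num) (by omega))
    rw [pow_one] at hA
    rw [Bool.eq_iff_iff]
    unfold l_r_is_prime
    rw [hA, alt_iff primes n h1]
  · have hn0 : n = 0 := by omega
    subst hn0
    have hAz : l_r_is_prime ((0:Nat) : Int) primes = true := by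
      simp [l_r_is_prime, pvALoop, PySem.Int.floordiv]
    have hBz : l_r_is_prime_alt ((0:Nat) : Int) primes = true := by
      have h : PySem.Str.len (PySem.Int.toStr ((0:Nat) : Int)) = 1 := by decide
      unfold l_r_is_prime_alt
      simp only [h, PySem.List.pyRange_one_eq_nil (by omega : (1:Int) ≤ 1), List.all_nil]
    rw [hAz, hBz]
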